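-- pv_equiv track=rewrite | github.com/neherlab/2024_msc_thesis_otter | benchmark/scripts/format_roary_output.py | combine_columns
-- ===== SOURCE A (Python) =====
-- def combine_columns(row,max_count):
--     locus_list = []
--     l = 0
--     s = 0
--     dupli="no"
--     sccg="no"
--     singleton="no"
--     for tag in row:
--         if isinstance(tag,str):
--             s+=1
--             if "\t" in tag:
--                 for t in tag.split("\t"):
--                     locus_list.append(t)
--                     l+=1
--                 dupli="yes"
--             else:
--                 l+=1
--                 locus_list.append(tag)
--     if s==1:
--         singleton="yes"
--     if (l==max_count) and (dupli=="no"):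
--         sccg="yes"
--
--     return locus_list, l, dupli, sccg, singleton
-- ===== SOURCE B (Python) =====
-- def combine_columns(row, max_count):
--     strings = [tag for tag in row if isinstance(tag, str)]
--     s = len(strings)
--     joined = "\t".join(strings)
--     locus_list = joined.split("\t") if s else []
--     l = joined.count("\t") + 1 if s else 0
--     dupli = "yes" if l > s else "no"
--     singleton = "yes" if s == 1 else "no"
--     sccg = "yes" if l == max_count and dupli == "no" else "no"
--     return locus_list, l, dupli, sccg, singleton
-- ===== Notes on version B (the rewrite author's own statement) =====
-- stated objective: alternative
-- what changed: Instead of A's fused loop that accumulates four state variables and splits each tagged string separately, B joins all string cells into one tab-separated string, splits that single string once to get the locus list, derives l from the tab count of the joined string, and reads dupli off the arithmetic relation l > number-of-strings.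
import Mathlib
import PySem

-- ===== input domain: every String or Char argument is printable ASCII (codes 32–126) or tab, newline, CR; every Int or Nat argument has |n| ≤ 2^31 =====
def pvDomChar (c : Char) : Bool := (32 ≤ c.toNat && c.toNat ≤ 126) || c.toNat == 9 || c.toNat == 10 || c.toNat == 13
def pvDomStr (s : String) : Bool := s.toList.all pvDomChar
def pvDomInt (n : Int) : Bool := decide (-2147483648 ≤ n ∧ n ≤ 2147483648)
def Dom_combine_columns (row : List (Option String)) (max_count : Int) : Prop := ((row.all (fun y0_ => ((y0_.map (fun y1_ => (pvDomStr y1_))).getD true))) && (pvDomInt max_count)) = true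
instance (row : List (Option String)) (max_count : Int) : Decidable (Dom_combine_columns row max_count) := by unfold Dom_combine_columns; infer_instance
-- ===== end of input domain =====

-- B replaces A's fused accumulating loop by one join of all string cells, one split of the
-- joined string, and arithmetic on its tab count (objective: alternative, same cost).

-- shared primitive: Python s.split("\t") (non-empty separator form of str.split)
def pySplitTab (s : String) : List String :=
  (PySem.Chars.splitOn s.toList ['\t']).map String.ofList

-- ===== PORT A =====
-- A's loop body, one step per row element (state: locus_list, l, s, dupli)
def stepA (st : List String × Int × Int × String) (tag : Option String) :
    List String × Int × Int × String :=
  match tag with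
  | some tag =>
    let s' := st.2.2.1 + 1
    if PySem.Str.isIn "\t" tag then
      let p := (pySplitTab tag).foldl
        (fun (p : List String × Int) t => (p.1 ++ [t], p.2 + 1)) (st.1, st.2.1)
      (p.1, p.2, s', "yes")
    else
      (st.1 ++ [tag], st.2.1 + 1, s', st.2.2.2)
  | none => st

def combine_columns (row : List (Option String)) (max_count : Int) : List String × Int × String × String × String :=
  let st := row.foldl stepA ([], 0, 0, "no")
  let singleton := if st.2.2.1 == 1 then "yes" else "no"
  let sccg := if st.2.1 == max_count && st.2.2.2 == "no" then "yes" else "no"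
  (st.1, st.2.1, st.2.2.2, sccg, singleton)

-- ===== PORT B =====
def combine_columns_alt (row : List (Option String)) (max_count : Int) : List String × Int × String × String × String :=
  let strings := row.filterMap id
  let s : Int := strings.length
  let joined := PySem.Str.join "\t" strings
  let locus_list := if s ≠ 0 then pySplitTab joined else []
  let l : Int := if s ≠ 0 then (PySem.Str.count joined "\t" : Int) + 1 else 0
  let dupli := if l > s then "yes" else "no"
  let singleton := if s == 1 then "yes" else "no"
  let sccg := if l == max_count && dupli == "no" then "yes" else "no"
  (locus_list, l, dupli, sccg, singleton)

-- ===== PRECONDITION & SPEC =====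
def Spec_combine_columns (row : List (Option String)) (max_count : Int) (out : List String × Int × String × String × String) : Prop := out = combine_columns_alt row max_count
instance (row : List (Option String)) (max_count : Int) (out : List String × Int × String × String × String) : Decidable (Spec_combine_columns row max_count out) := by unfold Spec_combine_columns; infer_instance

-- ===== CLAIM (what is proved, stated in full; the proofs are below) =====
def Claim_equal_combine_columns : Prop := ∀ (row : List (Option String)) (max_count : Int), Dom_combine_columns row max_count → Spec_combine_columns row max_count (combine_columns row max_count)

-- ===== LEMMAS AND PROOFS =====

-- recursive specification of splitting at every tab
def splitT : List Char → List (List Char)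
  | [] => [[]]
  | c :: r =>
      if c = '\t' then [] :: splitT r
      else
        match splitT r with
        | [] => [[c]]
        | h :: t => (c :: h) :: t

theorem splitT_ne_nil (cs : List Char) : splitT cs ≠ [] := by
  cases cs with
  | nil => simp [splitT]
  | cons c r =>
      simp only [splitT]
      split_ifs
      · simp
      · cases splitT r <;> simp

theorem splitT_go (fuel : Nat) (cs cur : List Char) (acc : List (List Char))
    (h : cs.length < fuel) :
    PySem.Chars.splitOn.go ['\t'] fuel cs cur acc
      = acc.reverse ++ (cur.reverse ++ (splitT cs).headI) :: (splitT cs).tail := by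
  induction fuel generalizing cs cur acc with
  | zero => omega
  | succ fuel ih =>
      cases cs with
      | nil => simp [PySem.Chars.splitOn.go, splitT]
      | cons c rest =>
          rw [PySem.Chars.splitOn.go]
          by_cases hc : c = '\t'
          · subst hc
            have hpre : List.isPrefixOf ['\t'] ('\t' :: rest) = true := by
              simp [List.isPrefixOf]
            simp only [hpre, if_true, List.length_cons, List.drop_succ_cons, List.length_nil,
              List.drop_zero]
            rw [ih rest [] (cur.reverse :: acc) (by simpa using Nat.lt_of_succ_lt_succ h)]
            rcases hsp : splitT rest with _ | ⟨h1, t1⟩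
            · exact absurd hsp (splitT_ne_nil rest)
            · simp [splitT, hsp]
          · have hpre : List.isPrefixOf ['\t'] (c :: rest) = false := by
              simp [List.isPrefixOf]; exact fun hc' => absurd hc'.symm hc
            simp only [hpre, Bool.false_eq_true, if_false]
            rw [ih rest (c :: cur) acc (by simpa using Nat.lt_of_succ_lt_succ h)]
            rcases hsp : splitT rest with _ | ⟨h1, t1⟩
            · exact absurd hsp (splitT_ne_nil rest)
            · simp [splitT, hc, hsp]

theorem splitOn_eq_splitT (cs : List Char) :
    PySem.Chars.splitOn cs ['\t'] = splitT cs := by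
  unfold PySem.Chars.splitOn
  rw [splitT_go _ _ _ _ (by omega)]
  rcases hsp : splitT cs with _ | ⟨h1, t1⟩
  · exact absurd hsp (splitT_ne_nil cs)
  · simp

theorem splitT_no_tab (cs : List Char) (h : '\t' ∉ cs) : splitT cs = [cs] := by
  induction cs with
  | nil => rfl
  | cons c r ih =>
      have hc : c ≠ '\t' := fun hc => h (hc ▸ List.mem_cons_self ..)
      rw [splitT, if_neg hc, ih (fun hm => h (List.mem_cons_of_mem _ hm))]

theorem splitT_length (cs : List Char) : (splitT cs).length = cs.count '\t' + 1 := by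
  induction cs with
  | nil => rfl
  | cons c r ih =>
      rw [splitT]
      by_cases hc : c = '\t'
      · simp [hc, ih]
      · rcases hsp : splitT r with _ | ⟨h1, t1⟩
        · exact absurd hsp (splitT_ne_nil r)
        · rw [hsp] at ih
          simp only [List.length_cons] at ih
          simp [hc, ih]

theorem splitT_append_tab (x y : List Char) :
    splitT (x ++ '\t' :: y) = splitT x ++ splitT y := by
  induction x with
  | nil => simp [splitT]
  | cons c r ih =>
      by_cases hc : c = '\t'
      · simp [splitT, hc, ih]
      · rcases hsp : splitT r with _ | ⟨h1, t1⟩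
        · exact absurd hsp (splitT_ne_nil r)
        · simp [splitT, if_neg hc, ih, hsp]

theorem splitT_intercalate (parts : List (List Char)) (h : parts ≠ []) :
    splitT (List.intercalate ['\t'] parts) = parts.flatMap splitT := by
  induction parts with
  | nil => exact absurd rfl h
  | cons p ps ih =>
      cases ps with
      | nil => simp [List.intercalate]
      | cons q qs =>
          have : List.intercalate ['\t'] (p :: q :: qs)
              = p ++ '\t' :: List.intercalate ['\t'] (q :: qs) := by
            simp [List.intercalate, List.intersperse]
          rw [this, splitT_append_tab, ih (by simp)]
          simp

theorem count_go_tab (fuel : Nat) (cs : List Char) (acc : Nat) (h : cs.length ≤ fuel) :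
    PySem.Chars.count.go ['\t'] fuel cs acc = acc + cs.count '\t' := by
  induction fuel generalizing cs acc with
  | zero =>
      have : cs = [] := List.length_eq_zero_iff.mp (Nat.le_zero.mp h)
      subst this; simp [PySem.Chars.count.go]
  | succ fuel ih =>
      cases cs with
      | nil => simp [PySem.Chars.count.go]
      | cons c rest =>
          rw [PySem.Chars.count.go]
          by_cases hc : c = '\t'
          · subst hc
            have hpre : List.isPrefixOf ['\t'] ('\t' :: rest) = true := by
              simp [List.isPrefixOf]
            simp only [hpre, if_true, List.length_cons, List.drop_succ_cons, List.length_nil,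
              List.drop_zero]
            rw [ih rest (acc + 1) (by simpa using Nat.le_of_succ_le_succ h)]
            simp
            omega
          · have hpre : List.isPrefixOf ['\t'] (c :: rest) = false := by
              simp [List.isPrefixOf]; exact fun hc' => absurd hc'.symm hc
            simp only [hpre, Bool.false_eq_true, if_false]
            rw [ih rest acc (by simpa using Nat.le_of_succ_le_succ h)]
            simp [hc]

theorem count_tab (cs : List Char) : PySem.Chars.count cs ['\t'] = cs.count '\t' := by
  unfold PySem.Chars.count
  simp [count_go_tab cs.length cs 0 le_rfl]

theorem isIn_tab (s : String) :
    PySem.Str.isIn "\t" s = true ↔ '\t' ∈ s.toList := by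
  rw [PySem.Str.isIn_iff_infix]
  constructor
  · intro hinf
    exact hinf.mem (by simp)
  · intro hm
    obtain ⟨l1, l2, hsplit⟩ := List.append_of_mem hm
    exact ⟨l1, l2, by simp [hsplit]⟩

-- A's inner append loop equals list append
theorem innerFold_eq (ts : List String) (acc : List String) (l : Int) :
    ts.foldl (fun (p : List String × Int) t => (p.1 ++ [t], p.2 + 1)) (acc, l)
      = (acc ++ ts, l + ts.length) := by
  induction ts generalizing acc l with
  | nil => simp
  | cons t ts ih =>
      simp only [List.foldl_cons, ih, List.length_cons, Prod.mk.injEq]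
      refine ⟨by simp, by push_cast; ring⟩

theorem stepA_none (st : List String × Int × Int × String) : stepA st none = st := rfl

theorem pySplitTab_of_no_tab (s : String) (h : PySem.Str.isIn "\t" s = false) :
    pySplitTab s = [s] := by
  have hmem : '\t' ∉ s.toList := by
    intro hm
    rw [(isIn_tab s).mpr hm] at h
    exact Bool.noConfusion h
  unfold pySplitTab
  rw [splitOn_eq_splitT, splitT_no_tab _ hmem]
  simp

theorem stepA_some_tab (acc : List String) (l s : Int) (d : String) (tag : String)
    (ht : PySem.Str.isIn "\t" tag = true) :
    stepA (acc, l, s, d) (some tag)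
      = (acc ++ pySplitTab tag, l + (pySplitTab tag).length, s + 1, "yes") := by
  have htc : PySem.Chars.isIn ['\t'] tag.toList = true := by simpa using ht
  simp [stepA, htc, innerFold_eq]

theorem stepA_some_no_tab (acc : List String) (l s : Int) (d : String) (tag : String)
    (ht : PySem.Str.isIn "\t" tag = false) :
    stepA (acc, l, s, d) (some tag) = (acc ++ [tag], l + 1, s + 1, d) := by
  have htc : PySem.Chars.isIn ['\t'] tag.toList = false := by simpa using ht
  simp [stepA, htc]

-- characterisation of A's fold
theorem foldA_eq (row : List (Option String)) (acc : List String) (l : Int) (s : Int) (d : String) :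
    row.foldl stepA (acc, l, s, d)
    = (acc ++ (row.filterMap id).flatMap pySplitTab,
       l + ((row.filterMap id).flatMap pySplitTab).length,
       s + (row.filterMap id).length,
       if (row.filterMap id).any (fun tag => PySem.Str.isIn "\t" tag) then "yes" else d) := by
  induction row generalizing acc l s d with
  | nil => simp
  | cons tag row ih =>
      cases tag with
      | none => simpa [stepA_none] using ih acc l s d
      | some tag =>
          rw [List.foldl_cons]
          by_cases ht : PySem.Str.isIn "\t" tag = true
          · have htc : PySem.Chars.isIn ['\t'] tag.toList = true := by simpa using ht
            rw [stepA_some_tab _ _ _ _ _ ht, ih]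
            simp only [List.filterMap_cons, id_eq, List.flatMap_cons, List.length_cons,
              List.any_cons, List.length_append, Prod.mk.injEq]
            refine ⟨by simp, by push_cast; omega, by push_cast; omega, by simp [htc]⟩
          · have ht' : PySem.Str.isIn "\t" tag = false := by simpa using ht
            have htc : PySem.Chars.isIn ['\t'] tag.toList = false := by simpa using ht'
            rw [stepA_some_no_tab _ _ _ _ _ ht', ih]
            simp only [List.filterMap_cons, id_eq, List.flatMap_cons, List.length_cons,
              List.any_cons, List.length_append, Prod.mk.injEq,
              pySplitTab_of_no_tab tag ht']
            refine ⟨by simp, by simp; omega, by push_cast; omega, by simp [htc]⟩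

-- the char-level flattened split has at least one piece per string
theorem flat_len_ge (strings : List String) :
    strings.length ≤ (strings.flatMap (fun t => splitT t.toList)).length := by
  induction strings with
  | nil => simp
  | cons t ts ih =>
      have h1 : 1 ≤ (splitT t.toList).length := by
        rw [splitT_length]; omega
      simp only [List.flatMap_cons, List.length_append, List.length_cons]
      omega

-- A's dupli test agrees with B's arithmetic test
theorem dupli_iff (strings : List String) :
    (strings.any (fun t => PySem.Str.isIn "\t" t) = true)
      ↔ strings.length < (strings.flatMap (fun t => splitT t.toList)).length := by
  induction strings with
  | nil => simp
  | cons t ts ih =>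
      have hge := flat_len_ge ts
      have hlen := splitT_length t.toList
      have hcnt : (PySem.Str.isIn "\t" t = true) ↔ 0 < t.toList.count '\t' := by
        rw [isIn_tab]; exact List.count_pos_iff.symm
      simp only [List.any_cons, Bool.or_eq_true, List.flatMap_cons, List.length_append,
        List.length_cons]
      constructor
      · rintro (h | h)
        · have := hcnt.mp h; omega
        · have := ih.mp h; omega
      · intro h
        by_cases hc : 0 < t.toList.count '\t'
        · exact Or.inl (hcnt.mpr hc)
        · exact Or.inr (ih.mpr (by omega))

-- B's split of the joined string is the concatenation of the per-string splits
theorem split_join_eq (strings : List String) (h : strings ≠ []) :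
    pySplitTab (PySem.Str.join "\t" strings) = strings.flatMap pySplitTab := by
  unfold pySplitTab
  rw [splitOn_eq_splitT, PySem.Str.toList_join]
  have hparts : (strings.map String.toList) ≠ [] := by simpa using h
  have : PySem.Chars.join "\t".toList (strings.map String.toList)
      = List.intercalate ['\t'] (strings.map String.toList) := rfl
  rw [this, splitT_intercalate _ hparts, List.flatMap_map, List.map_flatMap]
  simp only [splitOn_eq_splitT]

-- B's tab count of the joined string measures the concatenated split
theorem count_join_eq (strings : List String) (h : strings ≠ []) :
    PySem.Str.count (PySem.Str.join "\t" strings) "\t" + 1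
      = (strings.flatMap (fun t => splitT t.toList)).length := by
  rw [PySem.Str.count_eq]
  have : ("\t" : String).toList = ['\t'] := rfl
  rw [this, count_tab, ← splitT_length]
  congr 1
  rw [PySem.Str.toList_join]
  have hparts : (strings.map String.toList) ≠ [] := by simpa using h
  have h2 : PySem.Chars.join "\t".toList (strings.map String.toList)
      = List.intercalate ['\t'] (strings.map String.toList) := rfl
  rw [h2, splitT_intercalate _ hparts, List.flatMap_map]

-- lengths agree between string-level and char-level flattened splits
theorem flat_len_eq (strings : List String) :
    (strings.flatMap pySplitTab).length
      = (strings.flatMap (fun t => splitT t.toList)).length := by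
  induction strings with
  | nil => rfl
  | cons t ts ih =>
      simp only [List.flatMap_cons, List.length_append, ih]
      congr 1
      unfold pySplitTab
      rw [splitOn_eq_splitT, List.length_map]

-- ===== VERDICT (by name: the statement is the Claim_ definition above) =====
theorem combine_columns_spec : Claim_equal_combine_columns := by
  intro row max_count _
  unfold Spec_combine_columns combine_columns combine_columns_alt
  rw [foldA_eq]
  by_cases hne : row.filterMap id = []
  · have hne' : List.filterMap (fun x : Option String => x) row = [] := hne
    simp [hne']
  · set strings := row.filterMap id with hstr
    have hsne : ¬((strings.length : Int) = 0) := by simpa using hne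
    have hlN := count_join_eq strings hne
    have hfl := flat_len_eq strings
    have hl : (PySem.Str.count (PySem.Str.join "\t" strings) "\t" : Int) + 1
        = ((strings.flatMap pySplitTab).length : Int) := by omega
    have hdup : (strings.any (fun tag => PySem.Str.isIn "\t" tag) = true)
        ↔ ((strings.length : Int) < ((strings.flatMap pySplitTab).length : Int)) := by
      rw [dupli_iff strings]
      constructor
      · intro hlt; rw [← hfl] at hlt; exact_mod_cast hlt
      · intro hlt; rw [← hfl]; exact_mod_cast hlt
    have hD : (if strings.any (fun tag => PySem.Str.isIn "\t" tag) then "yes" else "no")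
        = (if ((strings.length : Int) < ((strings.flatMap pySplitTab).length : Int))
            then "yes" else "no") := by
      by_cases hA : strings.any (fun tag => PySem.Str.isIn "\t" tag) = true
      · rw [hA, if_pos rfl, if_pos (hdup.mp hA)]
      · have hA' : strings.any (fun tag => PySem.Str.isIn "\t" tag) = false :=
          eq_false_of_ne_true hA
        have hnlt : ¬ ((strings.length : Int) < ((strings.flatMap pySplitTab).length : Int)) :=
          fun hlt => hA (hdup.mpr hlt)
        rw [hA', if_neg (by simp), if_neg hnlt]
    simp only [List.nil_append, zero_add, ne_eq, hsne, not_false_eq_true, if_true,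
      split_join_eq strings hne, hl, hD]
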